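-- pv_equiv track=rewrite | github.com/robtapia/t3discretas | t3.py | aGrafo
-- ===== SOURCE A (Python) =====
-- def aGrafo(diccionario):
--     cantidad=len(diccionario)
--     peliculas=list(diccionario.keys())
--     a=[]
--     for i in range(cantidad):
--         b=[None]*cantidad
--         a.append(b)
--     for j in range(cantidad):
--         for l in range(cantidad):
--             if (set(diccionario[peliculas[l]]) & set(diccionario[peliculas[j]])):
--                 a[j][l]=1
--             else:
--                 a[j][l]=0
--     return a
-- ===== SOURCE B (Python) =====
-- def aGrafo(diccionario):
--     valores = list(diccionario.values())
--     n = len(valores)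
--     index = {}
--     for j, actores in enumerate(valores):
--         for actor in actores:
--             index[actor] = index.get(actor, []) + [j]
--     filas = []
--     for actores in valores:
--         vecinos = set()
--         for actor in actores:
--             vecinos.update(index.get(actor, []))
--         filas.append([1 if l in vecinos else 0 for l in range(n)])
--     return filas
-- ===== Notes on version B (the rewrite author's own statement) =====
-- stated objective: faster
-- what changed: Replaces the all-pairs set-intersection test (rebuilding both actor sets for every cell) with an inverted actor-to-movie-indices index built once; each row is then the union of the posting lists of its actors, so no pairwise intersection is computed.
import Mathlib
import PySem

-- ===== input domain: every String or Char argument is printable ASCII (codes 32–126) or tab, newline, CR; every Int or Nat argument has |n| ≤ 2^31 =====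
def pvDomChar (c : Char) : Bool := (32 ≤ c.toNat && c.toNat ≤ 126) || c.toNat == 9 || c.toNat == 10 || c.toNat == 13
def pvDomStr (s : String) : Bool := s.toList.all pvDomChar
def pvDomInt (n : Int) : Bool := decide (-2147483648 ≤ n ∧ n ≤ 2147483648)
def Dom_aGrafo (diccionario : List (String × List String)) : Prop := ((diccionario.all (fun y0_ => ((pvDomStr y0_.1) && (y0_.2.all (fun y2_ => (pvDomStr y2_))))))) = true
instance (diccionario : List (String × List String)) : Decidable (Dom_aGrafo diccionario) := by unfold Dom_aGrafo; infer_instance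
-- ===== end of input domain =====

-- B replaces A's all-pairs set-intersection test with an inverted actor→movie-index built once;
-- each row is the union of the posting lists of its actors (objective: faster).


-- ===== PORT A =====
-- literal port of A; '[None]*cantidad' is modelled with 0 as placeholder (None is not an Int;
-- the double loop below overwrites every cell before the matrix is returned)
def aGrafo (diccionario : List (String × List String)) : List (List Int) :=
  let d := PySem.Dict.ofList diccionario
  let cantidad : Int := PySem.Dict.size d
  let peliculas := PySem.Dict.keys d
  let a : List (List Int) :=
    (PySem.List.pyRange 0 cantidad 1).foldl
      (fun a _ => a ++ [List.replicate cantidad.toNat (0 : Int)]) []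
  (PySem.List.pyRange 0 cantidad 1).foldl (fun a j =>
    (PySem.List.pyRange 0 cantidad 1).foldl (fun a l =>
      let sl := PySem.Set.ofList (PySem.Dict.getD d (PySem.List.pyGetD peliculas l "") [])
      let sj := PySem.Set.ofList (PySem.Dict.getD d (PySem.List.pyGetD peliculas j "") [])
      let v : Int := if PySem.Set.inter sl sj ≠ [] then 1 else 0
      PySem.List.pySetD a j (PySem.List.pySetD (PySem.List.pyGetD a j []) l v)) a) a

-- ===== PORT B =====
def aGrafo_alt (diccionario : List (String × List String)) : List (List Int) :=
  let d := PySem.Dict.ofList diccionario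
  let valores := PySem.Dict.values d
  let n : Int := PySem.List.len valores
  let index : PySem.Dict String (List Int) :=
    (PySem.List.enumerate valores 0).foldl (fun idx p =>
      p.2.foldl (fun idx actor => PySem.Dict.modify idx actor [] (· ++ [p.1])) idx)
      PySem.Dict.empty
  valores.foldl (fun filas actores =>
    let vecinos : PySem.Set Int :=
      actores.foldl (fun v actor => PySem.Set.update v (PySem.Dict.getD index actor [])) PySem.Set.empty
    filas ++ [(PySem.List.pyRange 0 n 1).map (fun l => if PySem.Set.contains vecinos l then (1 : Int) else 0)]) []

-- ===== PRECONDITION & SPEC =====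
def Spec_aGrafo (diccionario : List (String × List String)) (out : List (List Int)) : Prop := out = aGrafo_alt diccionario
instance (diccionario : List (String × List String)) (out : List (List Int)) : Decidable (Spec_aGrafo diccionario out) := by unfold Spec_aGrafo; infer_instance

-- ===== CLAIM (what is proved, stated in full; the proofs are below) =====
def Claim_equal_aGrafo : Prop := ∀ (diccionario : List (String × List String)), Dom_aGrafo diccionario → Spec_aGrafo diccionario (aGrafo diccionario)

-- ===== LEMMAS AND PROOFS =====

-- the common shape both ports are reduced to: cell (j,l) is 1 iff movies j and l share an actor
def pvEntry (V : List (List String)) (j l : Nat) : Int :=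
  if (V.getD j []).any (fun x => (V.getD l []).contains x) then 1 else 0

def pvSpecMat (V : List (List String)) : List (List Int) :=
  (List.range V.length).map (fun j => (List.range V.length).map (fun l => pvEntry V j l))

-- ---- A side ----

-- inner loop: 'for l in range(m): a[j][l] = g(l)' rewrites row j in place
theorem pvInnerFold (g : Int → Int) (a : List (List Int)) (j : Nat) (m : Nat)
    (hj : j < a.length) (hm : m ≤ (a.getD j []).length) :
    (PySem.List.pyRange 0 (m : Int) 1).foldl
        (fun a l => PySem.List.pySetD a (j : Int) (PySem.List.pySetD (PySem.List.pyGetD a (j : Int) []) l (g l))) a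
      = a.set j (List.map (fun t : Nat => g (t : Int)) (List.range m) ++ (a.getD j []).drop m) := by
  induction m with
  | zero =>
    rw [PySem.List.pyRange_one_eq_nil (by simp)]
    simp only [List.foldl_nil, List.range_zero, List.map_nil, List.drop_zero, List.nil_append]
    rw [List.getD_eq_getElem a [] hj, List.set_getElem_self]
  | succ m ih =>
    have hm' : m ≤ (a.getD j []).length := Nat.le_of_succ_le hm
    have hcast : ((m + 1 : Nat) : Int) = (m : Int) + 1 := by push_cast; ring
    rw [hcast, PySem.List.pyRange_one_succ_right (by positivity), List.foldl_append, ih hm']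
    simp only [List.foldl_cons, List.foldl_nil]
    rw [PySem.List.pyGetD_natCast, PySem.List.pySetD_natCast]
    have hjlen : j < (a.set j (List.map (fun t : Nat => g (t : Int)) (List.range m) ++ (a.getD j []).drop m)).length := by
      simpa using hj
    rw [List.getD_eq_getElem _ [] hjlen, List.getElem_set_self (by simpa using hj)]
    rw [PySem.List.pySetD_natCast, List.set_set]
    congr 1
    have hdrop : (a.getD j []).drop m = (a.getD j [])[m] :: (a.getD j []).drop (m + 1) :=
      List.drop_eq_getElem_cons hm
    rw [hdrop]
    have hset : (List.map (fun t : Nat => g (t : Int)) (List.range m) ++ (a.getD j [])[m] :: (a.getD j []).drop (m + 1)).set m (g m)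
        = List.map (fun t : Nat => g (t : Int)) (List.range m) ++ (g m) :: (a.getD j []).drop (m + 1) := by
      rw [List.set_append_right _ _ (by simp), List.length_map, List.length_range, Nat.sub_self, List.set_cons_zero]
    rw [hset, List.range_succ, List.map_append]
    simp

-- outer loop: the first m rows become the computed rows, the rest is untouched
theorem pvOuterFold (g : Int → Int → Int) (n' : Nat) (a : List (List Int)) (m : Nat)
    (hm : m ≤ a.length) (hrows : ∀ r ∈ a, r.length = n') :
    (PySem.List.pyRange 0 (m : Int) 1).foldl (fun a j =>
      (PySem.List.pyRange 0 (n' : Int) 1).foldl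
        (fun a l => PySem.List.pySetD a j (PySem.List.pySetD (PySem.List.pyGetD a j []) l (g j l))) a) a
    = List.map (fun j : Nat => List.map (fun l : Nat => g (j : Int) (l : Int)) (List.range n')) (List.range m)
        ++ a.drop m := by
  induction m with
  | zero =>
    rw [show PySem.List.pyRange 0 ((0 : Nat) : Int) 1 = [] from PySem.List.pyRange_one_eq_nil (by simp)]
    simp
  | succ m ih =>
    have hm' : m ≤ a.length := Nat.le_of_succ_le hm
    have hcast : ((m + 1 : Nat) : Int) = (m : Int) + 1 := by push_cast; ring
    rw [hcast, show PySem.List.pyRange 0 ((m : Int) + 1) 1 = PySem.List.pyRange 0 (m : Int) 1 ++ [(m : Int)] from PySem.List.pyRange_one_succ_right (by positivity), List.foldl_append, ih hm']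
    simp only [List.foldl_cons, List.foldl_nil]
    set A := List.map (fun j : Nat => List.map (fun l : Nat => g (j : Int) (l : Int)) (List.range n')) (List.range m) ++ a.drop m with hA
    have hAlen : A.length = a.length := by
      simp [hA, List.length_append, List.length_map, List.length_range]
      omega
    have hmA : m < A.length := by omega
    have hrowA : A.getD m [] = a[m]'(by omega) := by
      rw [List.getD_eq_getElem?_getD, hA, List.getElem?_append_right (by simp)]
      simp only [List.length_map, List.length_range, Nat.sub_self, List.getElem?_drop, Nat.add_zero]
      rw [List.getElem?_eq_getElem (show m < a.length by omega)]
      rfl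
    have hrowlen : (A.getD m []).length = n' := by
      rw [hrowA]; exact hrows _ (List.getElem_mem _)
    rw [pvInnerFold (fun l => g (m : Int) l) A m n' hmA (le_of_eq hrowlen.symm)]
    simp only [hrowA]
    have hdropn : (a[m]'(by omega)).drop n' = [] := by
      rw [List.drop_eq_nil_iff]
      exact le_of_eq (hrows _ (List.getElem_mem _))
    rw [hdropn, List.append_nil, hA]
    rw [List.set_append_right _ _ (by simp), List.length_map, List.length_range, Nat.sub_self]
    rw [List.drop_eq_getElem_cons (by omega), List.set_cons_zero]
    rw [List.range_succ, List.map_append]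
    simp

-- looking a key of the dict up again returns the value at the same position
theorem pvGetD_keys (d : PySem.Dict String (List String)) (hnd : d.keys.Nodup) (l : Nat)
    (hk : l < d.keys.length) (hv : l < d.values.length) :
    PySem.Dict.getD d (d.keys[l]) [] = d.values[l] := by
  apply PySem.Dict.getD_of_mem_items d _ hnd
  have hi : l < d.items.length := by
    simpa [PySem.Dict.keys] using hk
  have h1 : d.keys[l] = (d.items[l]).1 := by simp [PySem.Dict.keys]
  have h2 : d.values[l] = (d.items[l]).2 := by simp [PySem.Dict.values]
  rw [h1, h2]
  exact List.getElem_mem hi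

theorem aGrafo_eq_spec (diccionario : List (String × List String)) :
    aGrafo diccionario = pvSpecMat (PySem.Dict.values (PySem.Dict.ofList diccionario)) := by
  have hA : aGrafo diccionario =
      (PySem.List.pyRange 0 ((PySem.Dict.size (PySem.Dict.ofList diccionario) : Int)) 1).foldl (fun a j =>
        (PySem.List.pyRange 0 ((PySem.Dict.size (PySem.Dict.ofList diccionario) : Int)) 1).foldl (fun a l =>
          PySem.List.pySetD a j (PySem.List.pySetD (PySem.List.pyGetD a j []) l
            (if PySem.Set.inter
                (PySem.Set.ofList (PySem.Dict.getD (PySem.Dict.ofList diccionario)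
                  (PySem.List.pyGetD (PySem.Dict.keys (PySem.Dict.ofList diccionario)) l "") []))
                (PySem.Set.ofList (PySem.Dict.getD (PySem.Dict.ofList diccionario)
                  (PySem.List.pyGetD (PySem.Dict.keys (PySem.Dict.ofList diccionario)) j "") [])) ≠ [] then 1 else 0))) a)
        ((PySem.List.pyRange 0 ((PySem.Dict.size (PySem.Dict.ofList diccionario) : Int)) 1).foldl
          (fun a _ => a ++ [List.replicate (Int.toNat ((PySem.Dict.size (PySem.Dict.ofList diccionario) : Int))) (0 : Int)]) []) := rfl
  rw [hA]
  set d := PySem.Dict.ofList diccionario with hd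
  set n := PySem.Dict.size d with hn
  have hkeys : d.keys.length = n := by simp [PySem.Dict.keys, PySem.Dict.size, hn]
  have hvals : d.values.length = n := by simp [PySem.Dict.values, PySem.Dict.size, hn]
  rw [PySem.List.foldl_append_singleton_eq_map (fun _ => List.replicate (Int.toNat (n : Int)) (0 : Int))]
  rw [List.nil_append, List.map_const', PySem.List.length_pyRange_one]
  have htn : ((n : Int) - 0).toNat = n := by omega
  have htn2 : (Int.toNat (n : Int)) = n := by omega
  rw [htn, htn2]
  rw [pvOuterFold
    (fun j l => if PySem.Set.inter
        (PySem.Set.ofList (PySem.Dict.getD d (PySem.List.pyGetD d.keys l "") []))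
        (PySem.Set.ofList (PySem.Dict.getD d (PySem.List.pyGetD d.keys j "") [])) ≠ [] then 1 else 0)
    n (List.replicate n (List.replicate n 0)) n (by simp) (by intro r hr; simp_all [List.eq_of_mem_replicate hr])]
  rw [List.drop_eq_nil_iff.mpr (by simp), List.append_nil]
  rw [pvSpecMat, hvals]
  apply List.map_congr_left
  intro j hj
  rw [List.mem_range] at hj
  apply List.map_congr_left
  intro l hl
  rw [List.mem_range] at hl
  have hpel : ∀ (k : Nat) (hk : k < n), PySem.List.pyGetD d.keys (k : Int) "" = d.keys[k]'(hkeys ▸ hk) := by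
    intro k hk
    rw [PySem.List.pyGetD_natCast, List.getD_eq_getElem d.keys "" (hkeys ▸ hk)]
  rw [hpel j hj, hpel l hl]
  rw [pvGetD_keys d (hd ▸ PySem.Dict.nodup_keys_ofList diccionario) l (by omega) (by omega),
      pvGetD_keys d (hd ▸ PySem.Dict.nodup_keys_ofList diccionario) j (by omega) (by omega)]
  rw [pvEntry, List.getD_eq_getElem d.values [] (by omega), List.getD_eq_getElem d.values [] (by omega)]
  congr 1
  rw [eq_iff_iff]
  constructor
  · intro hne
    rw [Ne, List.eq_nil_iff_forall_not_mem] at hne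
    push Not at hne
    obtain ⟨y, hy⟩ := hne
    rw [PySem.Set.mem_inter, PySem.Set.mem_ofList, PySem.Set.mem_ofList] at hy
    rw [List.any_eq_true]
    exact ⟨y, hy.2, List.contains_iff_mem.mpr hy.1⟩
  · intro hany
    rw [List.any_eq_true] at hany
    obtain ⟨x, hx1, hx2⟩ := hany
    rw [List.contains_iff_mem] at hx2
    rw [Ne, List.eq_nil_iff_forall_not_mem]
    push Not
    exact ⟨x, by rw [PySem.Set.mem_inter, PySem.Set.mem_ofList, PySem.Set.mem_ofList]; exact ⟨hx2, hx1⟩⟩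

-- ---- B side ----

-- the inverted index B builds: actor ↦ list of movie positions
def pvIndex (V : List (List String)) : PySem.Dict String (List Int) :=
  (PySem.List.enumerate V 0).foldl (fun idx p =>
      p.2.foldl (fun idx actor => PySem.Dict.modify idx actor [] (· ++ [p.1])) idx)
    PySem.Dict.empty

theorem pvIndex_getD (V : List (List String)) (actor : String) :
    PySem.Dict.getD (pvIndex V) actor []
      = (((PySem.List.enumerate V 0).flatMap (fun p => p.2.map (fun a => (a, p.1)))).filter
          (fun q => q.1 == actor)).map (·.2) := by
  unfold pvIndex
  have h : ∀ (p : Int × List String) (idx : PySem.Dict String (List Int)),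
      p.2.foldl (fun idx actor => PySem.Dict.modify idx actor [] (· ++ [p.1])) idx
        = (p.2.map (fun a => (a, p.1))).foldl (fun d q => PySem.Dict.modify d q.1 [] (· ++ [q.2])) idx := by
    intro p idx; rw [List.foldl_map]
  simp only [h]
  rw [← List.foldl_flatMap, PySem.Dict.getD_foldl_modify_append]
  simp [PySem.Dict.getD_empty]

theorem pvMem_index (V : List (List String)) (actor : String) (l : Int) :
    l ∈ PySem.Dict.getD (pvIndex V) actor [] ↔
      ∃ k : Nat, ∃ h : k < V.length, l = (k : Int) ∧ actor ∈ V[k] := by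
  rw [pvIndex_getD]
  simp only [List.mem_map, List.mem_filter, List.mem_flatMap, PySem.List.mem_enumerate_iff]
  constructor
  · rintro ⟨q, ⟨⟨p, ⟨⟨k, hk, rfl⟩, hq⟩⟩, heq⟩, rfl⟩
    simp at heq hq
    obtain ⟨a, ha, rfl⟩ := hq
    exact ⟨k, hk, by simp, heq ▸ ha⟩
  · rintro ⟨k, hk, rfl, ha⟩
    exact ⟨(actor, (k : Int)), ⟨⟨((k : Int), V[k]), ⟨k, hk, by simp⟩, by simp [ha]⟩, by simp⟩, rfl⟩

theorem pvMem_foldl_update {α β : Type} [BEq α] [LawfulBEq α] (xs : List β) (g : β → List α) (s : PySem.Set α) (y : α) :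
    y ∈ xs.foldl (fun v a => PySem.Set.update v (g a)) s ↔ y ∈ s ∨ ∃ a ∈ xs, y ∈ g a := by
  induction xs generalizing s with
  | nil => simp
  | cons x xs ih =>
    simp only [List.foldl_cons, ih, PySem.Set.mem_update, List.mem_cons]
    constructor
    · rintro (h | h)
      · rcases h with h | h
        · exact .inl h
        · exact .inr ⟨x, .inl rfl, h⟩
      · obtain ⟨a, ha, hy⟩ := h; exact .inr ⟨a, .inr ha, hy⟩
    · rintro (h | ⟨a, (rfl | ha), hy⟩)
      · exact .inl (.inl h)
      · exact .inl (.inr hy)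
      · exact .inr ⟨a, ha, hy⟩

-- one row of B: neighbours of a movie with actor list 'acts'
def pvRowOf (V : List (List String)) (acts : List String) : List Int :=
  (List.range V.length).map (fun l => if acts.any (fun x => (V.getD l []).contains x) then (1 : Int) else 0)

theorem pvRow_eq (V : List (List String)) (acts : List String) :
    (PySem.List.pyRange 0 (PySem.List.len V) 1).map (fun l =>
        if PySem.Set.contains
            (acts.foldl (fun v actor => PySem.Set.update v (PySem.Dict.getD (pvIndex V) actor []))
              PySem.Set.empty) l
          then (1 : Int) else 0)
      = pvRowOf V acts := by
  rw [PySem.List.pyRange_one, pvRowOf]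
  have hlen : ((PySem.List.len V : Int) - 0).toNat = V.length := by simp [PySem.List.len_eq]
  rw [hlen, List.map_map]
  apply List.map_congr_left
  intro k hk
  rw [List.mem_range] at hk
  simp only [Function.comp_apply]
  congr 1
  rw [eq_iff_iff, PySem.Set.contains_iff,
    pvMem_foldl_update acts (fun actor => PySem.Dict.getD (pvIndex V) actor []) PySem.Set.empty,
    List.any_eq_true]
  simp only [PySem.Set.empty, List.not_mem_nil, false_or, pvMem_index]
  constructor
  · rintro ⟨a, ha, k', hk', heq, hmem⟩
    have hkk : k = k' := by omega
    subst hkk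
    refine ⟨a, ha, ?_⟩
    rw [List.getD_eq_getElem V [] hk', List.contains_iff_mem]
    exact hmem
  · rintro ⟨a, ha, hmem⟩
    rw [List.getD_eq_getElem V [] hk, List.contains_iff_mem] at hmem
    exact ⟨a, ha, k, hk, by omega, hmem⟩

theorem pvSpecMat_eq_map (V : List (List String)) : pvSpecMat V = V.map (pvRowOf V) := by
  apply List.ext_getElem
  · simp [pvSpecMat]
  intro j h1 h2
  have hj : j < V.length := by simpa [pvSpecMat] using h1
  simp only [pvSpecMat, pvRowOf, pvEntry, List.getElem_map, List.getElem_range]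
  apply List.map_congr_left
  intro l _
  rw [List.getD_eq_getElem V [] hj]

theorem aGrafo_alt_eq_spec (diccionario : List (String × List String)) :
    aGrafo_alt diccionario = pvSpecMat (PySem.Dict.values (PySem.Dict.ofList diccionario)) := by
  unfold aGrafo_alt
  set V := PySem.Dict.values (PySem.Dict.ofList diccionario) with hV
  simp only []
  rw [show ∀ (f : List String → List Int), V.foldl (fun filas actores => filas ++ [f actores]) [] = V.map f from
    fun f => by simpa using PySem.List.foldl_append_singleton_eq_map (f := f) (l := V) (acc := [])]
  rw [pvSpecMat_eq_map]
  apply List.map_congr_left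
  intro acts _
  exact pvRow_eq V acts

-- ===== VERDICT (by name: the statement is the Claim_ definition above) =====
theorem aGrafo_spec : Claim_equal_aGrafo := by
  intro dic _
  unfold Spec_aGrafo
  rw [aGrafo_eq_spec, aGrafo_alt_eq_spec]
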